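-- pv_equiv track=rewrite | github.com/siriusnen-commits/archmind-mvp | src/archmind/project_query.py | _detect_plan_profile
-- ===== SOURCE A (Python) =====
-- from typing import Any
--
-- def _detect_plan_profile(
--     analysis_payload: dict[str, Any],
--     spec_payload: dict[str, Any],
--     project_name: str,
-- ) -> str:
--     entities = {str(item or "").strip().lower() for item in (analysis_payload.get("entities") or []) if str(item).strip()}
--     modules = {
--         str(item or "").strip().lower()
--         for item in (
--             analysis_payload.get("modules")
--             if isinstance(analysis_payload.get("modules"), list)
--             else spec_payload.get("modules") if isinstance(spec_payload.get("modules"), list) else []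
--         )
--         if str(item).strip()
--     }
--     domains = {
--         str(item or "").strip().lower()
--         for item in (
--             analysis_payload.get("domains")
--             if isinstance(analysis_payload.get("domains"), list)
--             else spec_payload.get("domains") if isinstance(spec_payload.get("domains"), list) else []
--         )
--         if str(item).strip()
--     }
--     name_text = str(project_name or "").strip().lower()
--     tokens = {*(entities), *(modules), *(domains), name_text}
--     if any("bookmark" in token for token in tokens):
--         return "bookmark"
--     if any(token in {"task", "tasks", "todo", "todos"} or "todo" in token for token in tokens):
--         return "todo"
--     if any(token in {"entry", "entries", "diary", "journal"} or "diary" in token or "journal" in token for token in tokens):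
--         return "diary"
--     return "generic"
-- ===== SOURCE B (Python) =====
-- def _detect_plan_profile(
--     analysis_payload,
--     spec_payload,
--     project_name,
-- ):
--     entities = {str(item or "").strip().lower() for item in (analysis_payload.get("entities") or []) if str(item).strip()}
--     modules = {
--         str(item or "").strip().lower()
--         for item in (
--             analysis_payload.get("modules")
--             if isinstance(analysis_payload.get("modules"), list)
--             else spec_payload.get("modules") if isinstance(spec_payload.get("modules"), list) else []
--         )
--         if str(item).strip()
--     }
--     domains = {
--         str(item or "").strip().lower()
--         for item in (
--             analysis_payload.get("domains")
--             if isinstance(analysis_payload.get("domains"), list)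
--             else spec_payload.get("domains") if isinstance(spec_payload.get("domains"), list) else []
--         )
--         if str(item).strip()
--     }
--     name_text = str(project_name or "").strip().lower()
--     tokens = {*entities, *modules, *domains, name_text}
--     # single pass: keep the best (smallest) category rank seen so far
--     best = 3
--     for token in tokens:
--         if "bookmark" in token:
--             rank = 0
--         elif token in {"task", "tasks", "todo", "todos"} or "todo" in token:
--             rank = 1
--         elif token in {"entry", "entries", "diary", "journal"} or "diary" in token or "journal" in token:
--             rank = 2
--         else:
--             rank = 3
--         if rank < best:
--             best = rank
--     return ("bookmark", "todo", "diary", "generic")[best]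
-- ===== Notes on version B (the rewrite author's own statement) =====
-- stated objective: alternative
-- what changed: Replaces A's three sequential any(...) scans over the token set by a single pass that assigns each token a priority rank (bookmark=0, todo=1, diary=2, none=3), keeps the minimum rank seen, and maps the best rank to its label at the end; the token-set construction is unchanged.
import Mathlib
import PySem

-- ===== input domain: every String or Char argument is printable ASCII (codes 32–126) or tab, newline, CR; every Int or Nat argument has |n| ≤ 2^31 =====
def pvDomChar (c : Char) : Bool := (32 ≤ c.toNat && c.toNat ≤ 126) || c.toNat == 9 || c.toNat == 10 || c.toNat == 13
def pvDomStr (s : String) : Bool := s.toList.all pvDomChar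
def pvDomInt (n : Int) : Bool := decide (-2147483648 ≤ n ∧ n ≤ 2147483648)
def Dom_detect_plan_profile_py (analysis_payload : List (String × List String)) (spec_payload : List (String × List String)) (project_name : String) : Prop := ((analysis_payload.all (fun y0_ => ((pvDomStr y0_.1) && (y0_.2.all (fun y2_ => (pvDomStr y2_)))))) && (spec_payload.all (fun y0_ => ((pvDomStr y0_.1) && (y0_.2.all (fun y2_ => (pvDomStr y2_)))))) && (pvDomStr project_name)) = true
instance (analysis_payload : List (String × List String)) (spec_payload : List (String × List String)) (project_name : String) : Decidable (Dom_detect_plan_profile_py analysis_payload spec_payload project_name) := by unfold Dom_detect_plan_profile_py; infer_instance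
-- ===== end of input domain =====

-- B replaces A's three sequential any(...) scans with one pass keeping the minimum priority
-- rank (bookmark=0 < todo=1 < diary=2); the token-set construction is shared unchanged.
-- Equivalence is over the RETURN value; neither program mutates its arguments.

-- ===== PORT A =====
-- shared token-set construction (identical in A and in B by design; B keeps it verbatim)
-- str(item or "").strip().lower() — for a str item, 'item or ""' is the identity
def pvNorm (s : String) : String := PySem.Str.lower (PySem.Str.strip s)

-- {str(item or "").strip().lower() for item in src if str(item).strip()}
def pvTokSet (src : List String) : PySem.Set String :=
  PySem.Set.ofList ((src.filter (fun item => PySem.Str.strip item != "")).map pvNorm)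

-- builds the combined token set 'tokens = {*entities, *modules, *domains, name_text}'
-- (get("entities") or [] collapses none and [] to []; the isinstance(..., list) tests on the
-- typed association lists hold exactly when the key is present)
def pvTokens (analysis_payload : List (String × List String)) (spec_payload : List (String × List String)) (project_name : String) : PySem.Set String :=
  let entities := pvTokSet (((PySem.Dict.mk analysis_payload).get? "entities").getD [])
  let modules := pvTokSet
    (match (PySem.Dict.mk analysis_payload).get? "modules" with
     | some l => l
     | none => ((PySem.Dict.mk spec_payload).get? "modules").getD [])
  let domains := pvTokSet
    (match (PySem.Dict.mk analysis_payload).get? "domains" with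
     | some l => l
     | none => ((PySem.Dict.mk spec_payload).get? "domains").getD [])
  let name_text := pvNorm project_name
  PySem.Set.add (PySem.Set.union (PySem.Set.union entities modules) domains) name_text

def detect_plan_profile_py (analysis_payload : List (String × List String)) (spec_payload : List (String × List String)) (project_name : String) : String :=
  let tokens := pvTokens analysis_payload spec_payload project_name
  if tokens.any (fun token => PySem.Str.isIn "bookmark" token) then "bookmark"
  else if tokens.any (fun token => ["task", "tasks", "todo", "todos"].contains token || PySem.Str.isIn "todo" token) then "todo"
  else if tokens.any (fun token => ["entry", "entries", "diary", "journal"].contains token || PySem.Str.isIn "diary" token || PySem.Str.isIn "journal" token) then "diary"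
  else "generic"

-- ===== PORT B =====
-- priority rank of one token: bookmark=0, todo=1, diary=2, no match=3
def pvRankB (token : String) : Nat :=
  if PySem.Str.isIn "bookmark" token then 0
  else if ["task", "tasks", "todo", "todos"].contains token || PySem.Str.isIn "todo" token then 1
  else if ["entry", "entries", "diary", "journal"].contains token || PySem.Str.isIn "diary" token || PySem.Str.isIn "journal" token then 2
  else 3

-- ("bookmark", "todo", "diary", "generic")[best]
def pvLabelB : Nat → String
  | 0 => "bookmark"
  | 1 => "todo"
  | 2 => "diary"
  | _ => "generic"

def detect_plan_profile_py_alt (analysis_payload : List (String × List String)) (spec_payload : List (String × List String)) (project_name : String) : String :=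
  let tokens := pvTokens analysis_payload spec_payload project_name
  let best := tokens.foldl (fun best token => min best (pvRankB token)) 3
  pvLabelB best

-- ===== PRECONDITION & SPEC =====
def Spec_detect_plan_profile_py (analysis_payload : List (String × List String)) (spec_payload : List (String × List String)) (project_name : String) (out : String) : Prop := out = detect_plan_profile_py_alt analysis_payload spec_payload project_name
instance (analysis_payload : List (String × List String)) (spec_payload : List (String × List String)) (project_name : String) (out : String) : Decidable (Spec_detect_plan_profile_py analysis_payload spec_payload project_name out) := by unfold Spec_detect_plan_profile_py; infer_instance

-- ===== CLAIM (what is proved, stated in full; the proofs are below) =====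
def Claim_equal_detect_plan_profile_py : Prop := ∀ (analysis_payload : List (String × List String)) (spec_payload : List (String × List String)) (project_name : String), Dom_detect_plan_profile_py analysis_payload spec_payload project_name → Spec_detect_plan_profile_py analysis_payload spec_payload project_name (detect_plan_profile_py analysis_payload spec_payload project_name)

-- ===== LEMMAS AND PROOFS =====

-- characterisation of the running minimum: best ≤ k iff the start is ≤ k or some token ranks ≤ k
lemma pv_foldl_min_le_iff (l : List String) (b k : Nat) :
    l.foldl (fun best token => min best (pvRankB token)) b ≤ k ↔
      b ≤ k ∨ ∃ t ∈ l, pvRankB t ≤ k := by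
  induction l generalizing b with
  | nil => simp
  | cons h t ih =>
    simp only [List.foldl_cons, ih, min_le_iff, List.mem_cons]
    constructor
    · rintro (⟨hb | hr⟩ | ⟨x, hx, hxk⟩)
      · exact Or.inl hb
      · exact Or.inr ⟨h, Or.inl rfl, hr⟩
      · exact Or.inr ⟨x, Or.inr hx, hxk⟩
    · rintro (hb | ⟨x, (rfl | hx), hxk⟩)
      · exact Or.inl (Or.inl hb)
      · exact Or.inl (Or.inr hxk)
      · exact Or.inr ⟨x, hx, hxk⟩

lemma pv_rank_eq_zero_iff (t : String) :
    pvRankB t = 0 ↔ PySem.Str.isIn "bookmark" t = true := by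
  unfold pvRankB; split_ifs <;> simp_all

lemma pv_rank_le_one_iff (t : String) :
    pvRankB t ≤ 1 ↔ (PySem.Str.isIn "bookmark" t
      || (["task", "tasks", "todo", "todos"].contains t || PySem.Str.isIn "todo" t)) = true := by
  unfold pvRankB; split_ifs <;> simp_all

lemma pv_rank_le_two_iff (t : String) :
    pvRankB t ≤ 2 ↔ (PySem.Str.isIn "bookmark" t
      || (["task", "tasks", "todo", "todos"].contains t || PySem.Str.isIn "todo" t)
      || (["entry", "entries", "diary", "journal"].contains t || PySem.Str.isIn "diary" t || PySem.Str.isIn "journal" t)) = true := by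
  unfold pvRankB; split_ifs <;> simp_all

-- the if-chain over three any-scans equals the label of the minimum rank, for any token list
lemma pv_key (l : List String) :
    (if l.any (fun token => PySem.Str.isIn "bookmark" token) then "bookmark"
     else if l.any (fun token => ["task", "tasks", "todo", "todos"].contains token || PySem.Str.isIn "todo" token) then "todo"
     else if l.any (fun token => ["entry", "entries", "diary", "journal"].contains token || PySem.Str.isIn "diary" token || PySem.Str.isIn "journal" token) then "diary"
     else "generic")
    = pvLabelB (l.foldl (fun best token => min best (pvRankB token)) 3) := by
  set m := l.foldl (fun best token => min best (pvRankB token)) 3 with hm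
  have hm3 : m ≤ 3 := by
    rw [hm, pv_foldl_min_le_iff]; exact Or.inl le_rfl
  by_cases h0 : l.any (fun token => PySem.Str.isIn "bookmark" token) = true
  · have : m ≤ 0 := by
      rw [hm, pv_foldl_min_le_iff]
      obtain ⟨t, ht, hpt⟩ := List.any_eq_true.mp h0
      exact Or.inr ⟨t, ht, by rw [Nat.le_zero, pv_rank_eq_zero_iff]; exact hpt⟩
    rw [if_pos h0, Nat.le_zero.mp this]; rfl
  · by_cases h1 : l.any (fun token => ["task", "tasks", "todo", "todos"].contains token || PySem.Str.isIn "todo" token) = true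
    · have hle : m ≤ 1 := by
        rw [hm, pv_foldl_min_le_iff]
        obtain ⟨t, ht, hpt⟩ := List.any_eq_true.mp h1
        refine Or.inr ⟨t, ht, ?_⟩
        rw [pv_rank_le_one_iff]; simp_all
      have hne : ¬ m ≤ 0 := by
        rw [hm, pv_foldl_min_le_iff]
        rintro (h | ⟨t, ht, hr⟩)
        · omega
        · rw [Nat.le_zero, pv_rank_eq_zero_iff] at hr
          exact h0 (List.any_eq_true.mpr ⟨t, ht, hr⟩)
      have : m = 1 := by omega
      rw [if_neg h0, if_pos h1, this]; rfl
    · by_cases h2 : l.any (fun token => ["entry", "entries", "diary", "journal"].contains token || PySem.Str.isIn "diary" token || PySem.Str.isIn "journal" token) = true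
      · have hle : m ≤ 2 := by
          rw [hm, pv_foldl_min_le_iff]
          obtain ⟨t, ht, hpt⟩ := List.any_eq_true.mp h2
          refine Or.inr ⟨t, ht, ?_⟩
          rw [pv_rank_le_two_iff]; simp_all
        have hne : ¬ m ≤ 1 := by
          rw [hm, pv_foldl_min_le_iff]
          rintro (h | ⟨t, ht, hr⟩)
          · omega
          · rw [pv_rank_le_one_iff] at hr
            rcases Bool.or_eq_true_iff.mp hr with hb | htd
            · exact h0 (List.any_eq_true.mpr ⟨t, ht, hb⟩)
            · exact h1 (List.any_eq_true.mpr ⟨t, ht, htd⟩)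
        have : m = 2 := by omega
        rw [if_neg h0, if_neg h1, if_pos h2, this]; rfl
      · have hne : ¬ m ≤ 2 := by
          rw [hm, pv_foldl_min_le_iff]
          rintro (h | ⟨t, ht, hr⟩)
          · omega
          · rw [pv_rank_le_two_iff] at hr
            rcases Bool.or_eq_true_iff.mp hr with hr' | hd
            · rcases Bool.or_eq_true_iff.mp hr' with hb | htd
              · exact h0 (List.any_eq_true.mpr ⟨t, ht, hb⟩)
              · exact h1 (List.any_eq_true.mpr ⟨t, ht, htd⟩)
            · exact h2 (List.any_eq_true.mpr ⟨t, ht, hd⟩)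
        have : m = 3 := by omega
        rw [if_neg h0, if_neg h1, if_neg h2, this]; rfl

-- ===== VERDICT (by name: the statement is the Claim_ definition above) =====
theorem detect_plan_profile_py_spec : Claim_equal_detect_plan_profile_py := by
  intro analysis_payload spec_payload project_name _
  unfold Spec_detect_plan_profile_py detect_plan_profile_py detect_plan_profile_py_alt
  exact pv_key (pvTokens analysis_payload spec_payload project_name)
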